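-- pv_equiv track=rewrite | github.com/abuss/pykod | pykod_config_generator.py | _categorize_aur_packages
-- ===== SOURCE A (Python) =====
-- def _categorize_aur_packages(packages: list) -> dict:
--     """Categorize AUR packages by type."""
--     categories = {
--         "Browsers": [],
--         "Development Tools": [],
--         "System Utilities": [],
--         "Media & Graphics": [],
--         "Gaming": [],
--         "Productivity": [],
--         "Fonts & Themes": [],
--         "Desktop Extensions": [],
--         "Drivers & Hardware": [],
--         "Other": [],
--     }
--
--     patterns = {
--         "Browsers": [
--             "browser",
--             "chrome",
--             "firefox",
--             "brave",
--             "vivaldi",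
--             "opera",
--             "zen-browser",
--         ],
--         "Development Tools": [
--             "visual-studio-code",
--             "code",
--             "ide",
--             "editor",
--             "git",
--             "dev",
--         ],
--         "System Utilities": ["manager", "tool", "util", "monitor", "fanctrl"],
--         "Media & Graphics": ["slicer", "3d", "graphics", "media", "player"],
--         "Gaming": ["game", "steam", "discord", "gaming"],
--         "Productivity": ["office", "note", "document", "pdf", "sync"],
--         "Fonts & Themes": ["ttf-", "font", "theme", "icon"],
--         "Desktop Extensions": ["gnome-shell-extension", "kde", "plasma", "desktop"],
--         "Drivers & Hardware": ["driver", "firmware", "hardware", "controller"],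
--     }
--
--     for pkg in packages:
--         categorized = False
--         for category, pattern_list in patterns.items():
--             for pattern in pattern_list:
--                 if pattern in pkg.lower():
--                     categories[category].append(pkg)
--                     categorized = True
--                     break
--             if categorized:
--                 break
--
--         if not categorized:
--             categories["Other"].append(pkg)
--
--     return {k: sorted(v) for k, v in categories.items() if v}
-- ===== SOURCE B (Python) =====
-- def _categorize_aur_packages(packages: list) -> dict:
--     """Categorize AUR packages by type (category-major sieve)."""
--     patterns = {
--         "Browsers": [
--             "browser",
--             "chrome",
--             "firefox",
--             "brave",
--             "vivaldi",
--             "opera",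
--             "zen-browser",
--         ],
--         "Development Tools": [
--             "visual-studio-code",
--             "code",
--             "ide",
--             "editor",
--             "git",
--             "dev",
--         ],
--         "System Utilities": ["manager", "tool", "util", "monitor", "fanctrl"],
--         "Media & Graphics": ["slicer", "3d", "graphics", "media", "player"],
--         "Gaming": ["game", "steam", "discord", "gaming"],
--         "Productivity": ["office", "note", "document", "pdf", "sync"],
--         "Fonts & Themes": ["ttf-", "font", "theme", "icon"],
--         "Desktop Extensions": ["gnome-shell-extension", "kde", "plasma", "desktop"],
--         "Drivers & Hardware": ["driver", "firmware", "hardware", "controller"],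
--     }
--
--     # Category-major sieve: each category in priority order takes every still
--     # unclaimed package matching one of its patterns; what survives all sieves
--     # is "Other".  Inverts A's package-major first-match scan.
--     result = {}
--     remaining = list(packages)
--     for cat, pats in patterns.items():
--         hit = []
--         miss = []
--         for pkg in remaining:
--             low = pkg.lower()
--             if any(s in low for s in pats):
--                 hit.append(pkg)
--             else:
--                 miss.append(pkg)
--         if hit:
--             result[cat] = sorted(hit)
--         remaining = miss
--     if remaining:
--         result["Other"] = sorted(remaining)
--     return result
-- ===== Notes on version B (the rewrite author's own statement) =====
-- stated objective: alternative
-- what changed: Inverts the loop structure: instead of A's package-major triple-nested first-match scan with break flags, B runs a category-major sieve - each category in priority order partitions the still-unclaimed packages into hits (its sorted bucket) and misses (passed to the next category), with survivors becoming 'Other'.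
import Mathlib
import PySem

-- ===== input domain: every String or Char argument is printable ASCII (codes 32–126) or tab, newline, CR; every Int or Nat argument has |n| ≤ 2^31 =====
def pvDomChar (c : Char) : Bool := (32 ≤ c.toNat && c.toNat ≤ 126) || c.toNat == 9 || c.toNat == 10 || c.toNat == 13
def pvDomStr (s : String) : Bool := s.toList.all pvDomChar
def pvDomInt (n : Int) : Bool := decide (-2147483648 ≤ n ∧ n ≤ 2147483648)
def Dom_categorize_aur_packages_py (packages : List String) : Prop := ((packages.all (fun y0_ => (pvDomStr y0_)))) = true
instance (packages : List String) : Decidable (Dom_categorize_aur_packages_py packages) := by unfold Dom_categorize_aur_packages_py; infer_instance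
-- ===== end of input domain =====

-- B replaces A's package-major triple-nested first-match scan (break flags) by a
-- category-major sieve: each category in priority order partitions the still-unclaimed
-- packages into its bucket and the rest; survivors become "Other" (objective: alternative).

-- Shared literal data (both Pythons carry the identical category/pattern literals).
def pvCats : List String :=
  ["Browsers", "Development Tools", "System Utilities", "Media & Graphics", "Gaming",
   "Productivity", "Fonts & Themes", "Desktop Extensions", "Drivers & Hardware", "Other"]

def pvPatterns : List (String × List String) :=
  [("Browsers", ["browser", "chrome", "firefox", "brave", "vivaldi", "opera", "zen-browser"]),
   ("Development Tools", ["visual-studio-code", "code", "ide", "editor", "git", "dev"]),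
   ("System Utilities", ["manager", "tool", "util", "monitor", "fanctrl"]),
   ("Media & Graphics", ["slicer", "3d", "graphics", "media", "player"]),
   ("Gaming", ["game", "steam", "discord", "gaming"]),
   ("Productivity", ["office", "note", "document", "pdf", "sync"]),
   ("Fonts & Themes", ["ttf-", "font", "theme", "icon"]),
   ("Desktop Extensions", ["gnome-shell-extension", "kde", "plasma", "desktop"]),
   ("Drivers & Hardware", ["driver", "firmware", "hardware", "controller"])]

-- ===== PORT A =====
-- inner 'for pattern in pattern_list: if pattern in pkg.lower(): … break' = first match
-- middle 'for category, pattern_list in patterns.items(): … if categorized: break'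
-- (categories[category].append(pkg) never misses a key, ported as Dict.modify with default [])
def aLoop (pkg : String) (pl : String) (d : PySem.Dict String (List String)) :
    List (String × List String) → PySem.Dict String (List String) × Bool
  | [] => (d, false)
  | (cat, pats) :: rest =>
      match pats.find? (fun pat => PySem.Str.isIn pat pl) with
      | some _ => (d.modify cat [] (fun v => v ++ [pkg]), true)
      | none => aLoop pkg pl d rest

def categorize_aur_packages_py (packages : List String) : List (String × List String) :=
  let init : PySem.Dict String (List String) := PySem.Dict.mk (pvCats.map (fun c => (c, [])))
  let d := packages.foldl (fun d pkg =>
    let r := aLoop pkg (PySem.Str.lower pkg) d pvPatterns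
    if r.2 then r.1 else r.1.modify "Other" [] (fun v => v ++ [pkg])) init
  -- {k: sorted(v) for k, v in categories.items() if v}
  (d.items.filter (fun kv => !kv.2.isEmpty)).map
    (fun kv => (kv.1, PySem.List.sorted kv.2 (fun x => x) false))

-- ===== PORT B =====
-- the inner 'for pkg in remaining: … hit.append / miss.append' loop of Source B
def bSplit (pats : List String) (remaining : List String) : List String × List String :=
  remaining.foldl (fun hm pkg =>
    let low := PySem.Str.lower pkg
    if pats.any (fun s => PySem.Str.isIn s low) then (hm.1 ++ [pkg], hm.2)
    else (hm.1, hm.2 ++ [pkg])) ([], [])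

-- 'result[cat] = sorted(hit)' always inserts a FRESH key (distinct category names, "Other"
-- only at the end), so the dict in insertion order is exactly the appended assoc list.
def categorize_aur_packages_py_alt (packages : List String) : List (String × List String) :=
  let fin := pvPatterns.foldl (fun st cp =>
    let hm := bSplit cp.2 st.2
    (if hm.1.isEmpty then st.1
     else st.1 ++ [(cp.1, PySem.List.sorted hm.1 (fun x => x) false)], hm.2))
    ([], packages)
  if fin.2.isEmpty then fin.1
  else fin.1 ++ [("Other", PySem.List.sorted fin.2 (fun x => x) false)]

-- ===== PRECONDITION & SPEC =====
def Spec_categorize_aur_packages_py (packages : List String) (out : List (String × List String)) : Prop := out = categorize_aur_packages_py_alt packages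
instance (packages : List String) (out : List (String × List String)) : Decidable (Spec_categorize_aur_packages_py packages out) := by unfold Spec_categorize_aur_packages_py; infer_instance

-- ===== CLAIM (what is proved, stated in full; the proofs are below) =====
def Claim_equal_categorize_aur_packages_py : Prop := ∀ (packages : List String), Dom_categorize_aur_packages_py packages → Spec_categorize_aur_packages_py packages (categorize_aur_packages_py packages)

-- ===== LEMMAS AND PROOFS =====

-- does category cp match the lowered package low?
def mP (cp : String × List String) (low : String) : Bool :=
  cp.2.any (fun s => PySem.Str.isIn s low)

-- the first matching category of the table L, if any
def catAux (L : List (String × List String)) (low : String) : Option String :=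
  (L.find? (fun cp => mP cp low)).map Prod.fst

def catOf (low : String) : String := (catAux pvPatterns low).getD "Other"

-- what B's sieve fold produces on table L over remaining rem
def core : List (String × List String) → List String → List (String × List String)
  | [], _ => []
  | cp :: tl, rem =>
      (if (rem.filter (fun p => mP cp (PySem.Str.lower p))).isEmpty then []
       else [(cp.1, PySem.List.sorted (rem.filter (fun p => mP cp (PySem.Str.lower p))) (fun x => x) false)]) ++
      core tl (rem.filter (fun p => !mP cp (PySem.Str.lower p)))

theorem catAux_cons (cp : String × List String) (tl : List (String × List String)) (low : String) :
    catAux (cp :: tl) low = if mP cp low then some cp.1 else catAux tl low := by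
  by_cases h : mP cp low <;> simp [catAux, List.find?_cons, h]

theorem catAux_mem {L : List (String × List String)} {low c : String}
    (h : catAux L low = some c) : c ∈ L.map Prod.fst := by
  unfold catAux at h
  cases hf : L.find? (fun cp => mP cp low) with
  | none => rw [hf] at h; cases h
  | some cp =>
      rw [hf] at h
      cases h
      exact List.mem_map.mpr ⟨cp, List.mem_of_find?_eq_some hf, rfl⟩

-- A's nested category/pattern loops take the first category any of whose patterns matches.
theorem aLoop_eq (pkg pl : String) (d : PySem.Dict String (List String))
    (L : List (String × List String)) :
    aLoop pkg pl d L =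
      match L.find? (fun cp => mP cp pl) with
      | some cp => (d.modify cp.1 [] (fun v => v ++ [pkg]), true)
      | none => (d, false) := by
  induction L with
  | nil => rfl
  | cons hd tl ih =>
      obtain ⟨c, pats⟩ := hd
      simp only [aLoop]
      cases h : pats.find? (fun pat => PySem.Str.isIn pat pl) with
      | some p =>
          have hm : mP (c, pats) pl = true := by
            have := List.mem_of_find?_eq_some h
            have hp := List.find?_some h
            exact List.any_eq_true.mpr ⟨p, this, hp⟩
          have hf : List.find? (fun cp => mP cp pl) ((c, pats) :: tl) = some (c, pats) := by
            rw [List.find?_cons]; simp [hm]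
          rw [hf]
      | none =>
          have hm : mP (c, pats) pl = false := by
            rw [Bool.eq_false_iff]
            intro hc
            obtain ⟨x, hx, hpx⟩ := List.any_eq_true.mp hc
            have := List.find?_eq_none.mp h x hx
            exact this hpx
          have hf : List.find? (fun cp => mP cp pl) ((c, pats) :: tl) =
              List.find? (fun cp => mP cp pl) tl := by
            rw [List.find?_cons]; simp [hm]
          rw [hf]
          exact ih

theorem stepA_eq (pkg pl : String) (d : PySem.Dict String (List String)) :
    (let r := aLoop pkg pl d pvPatterns
     if r.2 then r.1 else r.1.modify "Other" [] (fun v => v ++ [pkg])) =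
    d.modify (catOf pl) [] (fun v => v ++ [pkg]) := by
  show (if (aLoop pkg pl d pvPatterns).2 then (aLoop pkg pl d pvPatterns).1
        else (aLoop pkg pl d pvPatterns).1.modify "Other" [] (fun v => v ++ [pkg])) = _
  rw [aLoop_eq]
  unfold catOf catAux
  cases hf : pvPatterns.find? (fun cp => mP cp pl) with
  | some cp => rfl
  | none => rfl

theorem catOf_mem (low : String) : catOf low ∈ pvCats := by
  unfold catOf
  cases hf : catAux pvPatterns low with
  | none => simp [pvCats]
  | some c =>
      have hm := catAux_mem hf
      have hall : ∀ x ∈ pvPatterns.map Prod.fst, x ∈ pvCats := by decide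
      simpa using hall c hm

theorem set_update_self (s : List String) (l : List String) (h : ∀ x ∈ l, x ∈ s) :
    PySem.Set.update s l = s := by
  induction l generalizing s with
  | nil => rfl
  | cons x tl ih =>
      have hx : PySem.Set.add s x = s := by
        simp only [PySem.Set.add]
        split
        · rfl
        · exact absurd ((PySem.Set.contains_iff s x).mpr (h x (by simp))) (by assumption)
      show PySem.Set.update (PySem.Set.add s x) tl = s
      rw [hx]; exact ih s (fun y hy => h y (by simp [hy]))

theorem mk_nil_getD (L : List String) (c : String) :
    (PySem.Dict.mk (L.map (fun k => (k, ([] : List String))))).getD c [] = [] := by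
  induction L with
  | nil => rfl
  | cons hd tl ih =>
      rw [PySem.Dict.getD_eq_get?_getD] at ih ⊢
      simp only [List.map_cons, PySem.Dict.get?_mk_cons]
      split <;> simp_all

-- A's grouping fold, bucket contents
theorem fold_getD (packages : List String) (d : PySem.Dict String (List String)) (c : String) :
    (packages.foldl (fun b pkg =>
        b.modify (catOf (PySem.Str.lower pkg)) [] (fun v => v ++ [pkg])) d).getD c [] =
      d.getD c [] ++ packages.filter (fun p => catOf (PySem.Str.lower p) == c) := by
  have h1 : packages.foldl (fun b pkg =>
        b.modify (catOf (PySem.Str.lower pkg)) [] (fun v => v ++ [pkg])) d =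
      (packages.map (fun p => (catOf (PySem.Str.lower p), p))).foldl
        (fun b q => b.modify q.1 [] (fun v => v ++ [q.2])) d := by
    rw [List.foldl_map]
  rw [h1, PySem.Dict.getD_foldl_modify_append]
  congr 1
  rw [List.filter_map, List.map_map]
  simp [Function.comp_def]

theorem fold_keys (packages : List String) (d : PySem.Dict String (List String)) :
    (packages.foldl (fun b pkg =>
        b.modify (catOf (PySem.Str.lower pkg)) [] (fun v => v ++ [pkg])) d).keys =
      PySem.Set.update d.keys (packages.map (fun p => catOf (PySem.Str.lower p))) := by
  exact PySem.Dict.keys_foldl_modify_key packages (fun p => catOf (PySem.Str.lower p))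
    [] (fun _ pkg => (fun v => v ++ [pkg])) d

-- A's output in closed form: per-category filters by first matching category
theorem aSide (packages : List String) :
    categorize_aur_packages_py packages =
      ((pvCats.map (fun c => (c, packages.filter (fun p => catOf (PySem.Str.lower p) == c)))).filter
          (fun kv => !kv.2.isEmpty)).map
        (fun kv => (kv.1, PySem.List.sorted kv.2 (fun x => x) false)) := by
  unfold categorize_aur_packages_py
  have hfun : (fun (d : PySem.Dict String (List String)) (pkg : String) =>
      let r := aLoop pkg (PySem.Str.lower pkg) d pvPatterns
      if r.2 then r.1 else r.1.modify "Other" [] (fun v => v ++ [pkg])) =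
      (fun d pkg => d.modify (catOf (PySem.Str.lower pkg)) [] (fun v => v ++ [pkg])) :=
    funext fun d => funext fun pkg => stepA_eq pkg (PySem.Str.lower pkg) d
  rw [hfun]
  dsimp only
  set filt : String → List String :=
    fun c => packages.filter (fun p => catOf (PySem.Str.lower p) == c) with hfilt
  set init : PySem.Dict String (List String) := PySem.Dict.mk (pvCats.map (fun c => (c, []))) with hinit
  set dA := packages.foldl
    (fun d pkg => d.modify (catOf (PySem.Str.lower pkg)) [] (fun v => v ++ [pkg])) init with hdA
  have hinitKeys : init.keys = pvCats := by
    rw [hinit]; simp [PySem.Dict.keys_mk, List.map_map, Function.comp_def]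
  have hkeysA : dA.keys = pvCats := by
    rw [hdA, fold_keys, hinitKeys]
    exact set_update_self pvCats _ (by
      intro x hx
      obtain ⟨p, _, rfl⟩ := List.mem_map.mp hx
      exact catOf_mem (PySem.Str.lower p))
  have hnodupA : dA.keys.Nodup := by rw [hkeysA]; decide
  have hgA : ∀ c, dA.getD c [] = filt c := by
    intro c
    rw [hdA, fold_getD, hinit, mk_nil_getD, hfilt]
    simp
  have hitems : dA.items = pvCats.map (fun c => (c, filt c)) := by
    rw [PySem.Dict.items_eq_map_keys dA hnodupA [], hkeysA]
    exact List.map_congr_left (fun c _ => by rw [hgA c])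
  rw [hitems]

-- Source B's inner hit/miss loop is the filter / counter-filter pair
theorem bSplit_eq (pats : List String) (remaining : List String) :
    bSplit pats remaining =
      (remaining.filter (fun p => pats.any (fun s => PySem.Str.isIn s (PySem.Str.lower p))),
       remaining.filter (fun p => !pats.any (fun s => PySem.Str.isIn s (PySem.Str.lower p)))) := by
  have key : ∀ (rem : List String) (a b : List String),
      rem.foldl (fun hm pkg =>
        let low := PySem.Str.lower pkg
        if pats.any (fun s => PySem.Str.isIn s low) then (hm.1 ++ [pkg], hm.2)
        else (hm.1, hm.2 ++ [pkg])) (a, b) =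
      (a ++ rem.filter (fun p => pats.any (fun s => PySem.Str.isIn s (PySem.Str.lower p))),
       b ++ rem.filter (fun p => !pats.any (fun s => PySem.Str.isIn s (PySem.Str.lower p)))) := by
    intro rem
    induction rem with
    | nil => intro a b; simp
    | cons hd tl ih =>
        intro a b
        by_cases h : pats.any (fun s => PySem.Str.isIn s (PySem.Str.lower hd)) = true
        · simp only [List.foldl_cons, h, if_pos, List.filter_cons, Bool.not_true]
          rw [ih]
          simp [h]
        · have h' : pats.any (fun s => PySem.Str.isIn s (PySem.Str.lower hd)) = false :=
            Bool.eq_false_iff.mpr h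
          simp only [List.foldl_cons, h', if_neg, List.filter_cons, Bool.not_false]
          rw [ih]
          simp [h']
  unfold bSplit
  rw [key remaining [] []]
  simp

-- B's category fold in closed form
theorem bfold (L : List (String × List String)) (res : List (String × List String))
    (rem : List String) :
    L.foldl (fun st cp =>
      let hm := bSplit cp.2 st.2
      (if hm.1.isEmpty then st.1
       else st.1 ++ [(cp.1, PySem.List.sorted hm.1 (fun x => x) false)], hm.2)) (res, rem) =
    (res ++ core L rem,
     rem.filter (fun p => L.all (fun cp => !mP cp (PySem.Str.lower p)))) := by
  induction L generalizing res rem with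
  | nil => simp [core]
  | cons cp tl ih =>
      have hsp : bSplit cp.2 rem =
          (rem.filter (fun p => mP cp (PySem.Str.lower p)),
           rem.filter (fun p => !mP cp (PySem.Str.lower p))) := by
        rw [bSplit_eq]; rfl
      simp only [List.foldl_cons, hsp]
      rw [ih]
      refine Prod.ext ?_ ?_
      · show (if (rem.filter (fun p => mP cp (PySem.Str.lower p))).isEmpty then res
              else res ++ [(cp.1, PySem.List.sorted (rem.filter (fun p => mP cp (PySem.Str.lower p))) (fun x => x) false)]) ++
              core tl (rem.filter (fun p => !mP cp (PySem.Str.lower p))) = res ++ core (cp :: tl) rem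
        by_cases he : (rem.filter (fun p => mP cp (PySem.Str.lower p))).isEmpty
        · simp [core, he]
        · simp [core, he, List.append_assoc]
      · show (rem.filter (fun p => !mP cp (PySem.Str.lower p))).filter
              (fun p => tl.all (fun cq => !mP cq (PySem.Str.lower p))) =
            rem.filter (fun p => (cp :: tl).all (fun cq => !mP cq (PySem.Str.lower p)))
        rw [List.filter_filter]
        apply List.filter_congr
        intro p _
        simp [List.all_cons, Bool.and_comm]

-- first matching category buckets = B's sieve
theorem core_eq (L : List (String × List String)) (hnd : (L.map Prod.fst).Nodup)
    (rem : List String) :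
    core L rem =
      ((L.map (fun cp => (cp.1, rem.filter (fun p => catAux L (PySem.Str.lower p) == some cp.1)))).filter
          (fun kv => !kv.2.isEmpty)).map
        (fun kv => (kv.1, PySem.List.sorted kv.2 (fun x => x) false)) := by
  induction L generalizing rem with
  | nil => rfl
  | cons cp tl ih =>
      have hnotin : cp.1 ∉ tl.map Prod.fst := (List.nodup_cons.mp hnd).1
      have hnd' : (tl.map Prod.fst).Nodup := (List.nodup_cons.mp hnd).2
      have hhead : rem.filter (fun p => catAux (cp :: tl) (PySem.Str.lower p) == some cp.1)
          = rem.filter (fun p => mP cp (PySem.Str.lower p)) := by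
        apply List.filter_congr
        intro p _
        rw [catAux_cons]
        by_cases h : mP cp (PySem.Str.lower p)
        · simp [h]
        · rw [if_neg (by simp [h])]
          cases hx : catAux tl (PySem.Str.lower p) with
          | none => simp [h]
          | some c =>
              have hne : c ≠ cp.1 := fun he => hnotin (he ▸ catAux_mem hx)
              simp [h, hne]
      have htail : tl.map (fun cq => (cq.1,
              rem.filter (fun p => catAux (cp :: tl) (PySem.Str.lower p) == some cq.1)))
          = tl.map (fun cq => (cq.1,
              (rem.filter (fun p => !mP cp (PySem.Str.lower p))).filter
                (fun p => catAux tl (PySem.Str.lower p) == some cq.1))) := by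
        apply List.map_congr_left
        intro cq hq
        have hq1 : cq.1 ∈ tl.map Prod.fst := List.mem_map.mpr ⟨cq, hq, rfl⟩
        have hne : cp.1 ≠ cq.1 := fun he => hnotin (he ▸ hq1)
        have : (rem.filter (fun p => !mP cp (PySem.Str.lower p))).filter
                (fun p => catAux tl (PySem.Str.lower p) == some cq.1) =
            rem.filter (fun p => catAux (cp :: tl) (PySem.Str.lower p) == some cq.1) := by
          rw [List.filter_filter]
          apply List.filter_congr
          intro p _
          rw [catAux_cons]
          by_cases h : mP cp (PySem.Str.lower p)
          · simp [h, hne]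
          · simp [h]
        rw [this]
      rw [List.map_cons, hhead, htail, List.filter_cons]
      by_cases he : (rem.filter (fun p => mP cp (PySem.Str.lower p))).isEmpty
      · simp only [core, he, if_true, List.nil_append, Bool.not_true,
          Bool.false_eq_true, if_false]
        exact ih hnd' _
      · simp only [core, he, if_false, Bool.not_false, if_true, List.map_cons,
          List.cons_append, List.nil_append]
        rw [ih hnd' _]
        simp

-- ===== VERDICT (by name: the statement is the Claim_ definition above) =====
-- pointwise: 'first category of p is c' (c a real category) as a catAux equation
theorem catOf_eq_name (c : String) (hc : c ∈ pvPatterns.map Prod.fst) (low : String) :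
    (catOf low == c) = (catAux pvPatterns low == some c) := by
  unfold catOf
  cases hx : catAux pvPatterns low with
  | none =>
      have hno : ("Other" : String) ∉ pvPatterns.map Prod.fst := by decide
      have hne : c ≠ "Other" := fun he => hno (he ▸ hc)
      simp [Ne.symm hne]
  | some c' => rfl

-- pointwise: 'p falls through to Other' = 'no category matches'
theorem catOf_eq_other (low : String) :
    (catOf low == "Other") = pvPatterns.all (fun cp => !mP cp low) := by
  unfold catOf catAux
  cases hf : pvPatterns.find? (fun cp => mP cp low) with
  | none =>
      have hall : pvPatterns.all (fun cp => !mP cp low) = true := by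
        rw [List.all_eq_true]
        intro cp hcp
        simpa using List.find?_eq_none.mp hf cp hcp
      simp [hall]
  | some cp =>
      have hm := List.find?_some hf
      have hmem := List.mem_of_find?_eq_some hf
      have hall : pvPatterns.all (fun cp => !mP cp low) = false := by
        rw [Bool.eq_false_iff]
        intro h
        have := List.all_eq_true.mp h cp hmem
        simp [hm] at this
      have hno : ("Other" : String) ∉ pvPatterns.map Prod.fst := by decide
      have hne : cp.1 ≠ "Other" := fun he => hno (he ▸ List.mem_map.mpr ⟨cp, hmem, rfl⟩)
      simp [hall, hne]

-- ===== VERDICT (by name: the statement is the Claim_ definition above) =====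
set_option maxHeartbeats 2000000 in
theorem categorize_aur_packages_py_spec : Claim_equal_categorize_aur_packages_py := by
  intro packages _
  unfold Spec_categorize_aur_packages_py categorize_aur_packages_py_alt
  rw [aSide, bfold]
  dsimp only
  have hnames : pvCats = pvPatterns.map Prod.fst ++ ["Other"] := by decide
  rw [hnames, List.map_append, List.filter_append, List.map_append]
  have hcoreside :
      ((List.map (fun c => (c, packages.filter (fun p => catOf (PySem.Str.lower p) == c)))
          (pvPatterns.map Prod.fst)).filter (fun kv => !kv.2.isEmpty)).map
        (fun kv => (kv.1, PySem.List.sorted kv.2 (fun x => x) false)) =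
      core pvPatterns packages := by
    rw [core_eq pvPatterns (by decide) packages, List.map_map]
    congr 1
    congr 1
    apply List.map_congr_left
    intro cp hcp
    have hc : cp.1 ∈ pvPatterns.map Prod.fst := List.mem_map.mpr ⟨cp, hcp, rfl⟩
    show (cp.1, packages.filter (fun p => catOf (PySem.Str.lower p) == cp.1)) = _
    congr 1
    apply List.filter_congr
    intro p _
    exact catOf_eq_name cp.1 hc (PySem.Str.lower p)
  have hoth : packages.filter (fun p => catOf (PySem.Str.lower p) == "Other") =
      packages.filter (fun p => pvPatterns.all (fun cp => !mP cp (PySem.Str.lower p))) := by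
    apply List.filter_congr
    intro p _
    exact catOf_eq_other (PySem.Str.lower p)
  rw [hcoreside]
  simp only [List.map_cons, List.map_nil, List.filter_cons, List.filter_nil, hoth]
  by_cases he : (packages.filter
      (fun p => pvPatterns.all (fun cp => !mP cp (PySem.Str.lower p)))).isEmpty
  · simp [he]
  · simp [he]
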